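-- pv_equiv track=rewrite | github.com/omniscale-ai/reasoning-scale2 | tasks/t0009_hierarchical_annotation_v2/code/build_v2_asset.py | _bench_breakdown
-- ===== SOURCE A (Python) =====
-- from typing import Any
--
-- def _bench_breakdown(rows: list[dict[str, Any]]) -> dict[str, dict[str, int]]:
--     out: dict[str, dict[str, int]] = {}
--     for row in rows:
--         bench = row.get("benchmark", "")
--         bucket = out.setdefault(
--             bench,
--             {
--                 "total": 0,
--                 "complete": 0,
--                 "judged": 0,
--                 "acceptable": 0,
--                 "needs_revision": 0,
--             },
--         )
--         bucket["total"] += 1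
--         if row.get("hierarchy_completeness"):
--             bucket["complete"] += 1
--         verdict = row.get("judge_verdict")
--         if verdict == "acceptable":
--             bucket["acceptable"] += 1
--             bucket["judged"] += 1
--         elif verdict == "needs revision":
--             bucket["needs_revision"] += 1
--             bucket["judged"] += 1
--     return out
-- ===== SOURCE B (Python) =====
-- from typing import Any
--
-- def _bench_breakdown(rows: list[dict[str, Any]]) -> dict[str, dict[str, int]]:
--     # Group rows by benchmark (encounter order), then count each group independently.
--     groups: dict[str, list[dict[str, Any]]] = {}
--     for row in rows:
--         groups.setdefault(row.get("benchmark", ""), []).append(row)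
--     out: dict[str, dict[str, int]] = {}
--     for bench, grp in groups.items():
--         acceptable = sum(1 for r in grp if r.get("judge_verdict") == "acceptable")
--         needs = sum(1 for r in grp if r.get("judge_verdict") == "needs revision")
--         out[bench] = {
--             "total": len(grp),
--             "complete": sum(1 for r in grp if r.get("hierarchy_completeness")),
--             "judged": acceptable + needs,
--             "acceptable": acceptable,
--             "needs_revision": needs,
--         }
--     return out
-- ===== Notes on version B (the rewrite author's own statement) =====
-- stated objective: alternative
-- what changed: Replaces the single pass with incrementally-mutated counter dicts by a group-by-benchmark index built first, then computing each bucket's five counts independently per group.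
import Mathlib
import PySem

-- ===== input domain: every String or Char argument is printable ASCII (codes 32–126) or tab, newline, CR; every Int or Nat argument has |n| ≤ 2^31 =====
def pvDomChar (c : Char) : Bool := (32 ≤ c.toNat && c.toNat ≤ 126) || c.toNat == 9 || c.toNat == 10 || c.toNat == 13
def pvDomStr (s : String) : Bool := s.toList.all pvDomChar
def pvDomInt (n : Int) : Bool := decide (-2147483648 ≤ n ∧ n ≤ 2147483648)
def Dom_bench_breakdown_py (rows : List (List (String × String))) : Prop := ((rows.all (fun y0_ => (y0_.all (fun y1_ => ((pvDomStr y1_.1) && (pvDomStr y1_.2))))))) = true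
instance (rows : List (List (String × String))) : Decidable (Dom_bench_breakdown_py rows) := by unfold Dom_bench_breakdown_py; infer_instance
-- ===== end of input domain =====

-- B builds a benchmark→rows index first and counts each group independently, instead of A's
-- incrementally-mutated per-bench counter dicts (objective: alternative decomposition, same cost).

-- ===== PORT A =====
-- row.get(k) on a dict row = first-match lookup in the association list
def pvRowGet (row : List (String × String)) (k : String) : Option String :=
  (PySem.Dict.mk row).get? k

-- Python truthiness of row.get("hierarchy_completeness"): None and "" are falsy
def pvTruthy (o : Option String) : Bool :=
  match o with
  | none => false
  | some s => s ≠ ""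

def pvDefaultBucket : PySem.Dict String Int :=
  PySem.Dict.mk [("total", 0), ("complete", 0), ("judged", 0), ("acceptable", 0), ("needs_revision", 0)]

-- the in-place mutations A performs on the (aliased) bucket for one row
def pvUpdRow (b : PySem.Dict String Int) (row : List (String × String)) : PySem.Dict String Int :=
  let b := b.modify "total" 0 (· + 1)
  let b := if pvTruthy (pvRowGet row "hierarchy_completeness") then b.modify "complete" 0 (· + 1) else b
  let verdict := pvRowGet row "judge_verdict"
  if verdict = some "acceptable" then (b.modify "acceptable" 0 (· + 1)).modify "judged" 0 (· + 1)
  else if verdict = some "needs revision" then (b.modify "needs_revision" 0 (· + 1)).modify "judged" 0 (· + 1)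
  else b

-- one iteration of A's loop: setdefault, then the mutations land back in out under bench
def pvStepA (out : PySem.Dict String (PySem.Dict String Int)) (row : List (String × String)) :
    PySem.Dict String (PySem.Dict String Int) :=
  let bench := (pvRowGet row "benchmark").getD ""
  let out := out.setdefault bench pvDefaultBucket
  out.insert bench (pvUpdRow (out.getD bench pvDefaultBucket) row)

def bench_breakdown_py (rows : List (List (String × String))) : List (String × List (String × Int)) :=
  ((rows.foldl pvStepA PySem.Dict.empty).items).map (fun p => (p.1, p.2.items))

-- ===== PORT B =====
def pvBBench (row : List (String × String)) : String :=
  ((PySem.Dict.mk row).get? "benchmark").getD ""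

def pvBCompl (row : List (String × String)) : Bool :=
  match (PySem.Dict.mk row).get? "hierarchy_completeness" with
  | none => false
  | some s => s ≠ ""

def pvBVerdict (row : List (String × String)) : Option String :=
  (PySem.Dict.mk row).get? "judge_verdict"

-- sum(1 for r in grp if p(r)) = countP
def pvBBucket (grp : List (List (String × String))) : List (String × Int) :=
  let acceptable : Int := grp.countP (fun r => pvBVerdict r = some "acceptable")
  let needs : Int := grp.countP (fun r => pvBVerdict r = some "needs revision")
  [("total", (grp.length : Int)),
   ("complete", (grp.countP pvBCompl : Int)),
   ("judged", acceptable + needs),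
   ("acceptable", acceptable),
   ("needs_revision", needs)]

def bench_breakdown_py_alt (rows : List (List (String × String))) : List (String × List (String × Int)) :=
  let groups := rows.foldl (fun g row => g.modify (pvBBench row) [] (· ++ [row])) PySem.Dict.empty
  groups.items.map (fun p => (p.1, pvBBucket p.2))

-- ===== PRECONDITION & SPEC =====
def Spec_bench_breakdown_py (rows : List (List (String × String))) (out : List (String × List (String × Int))) : Prop := out = bench_breakdown_py_alt rows
instance (rows : List (List (String × String))) (out : List (String × List (String × Int))) : Decidable (Spec_bench_breakdown_py rows out) := by unfold Spec_bench_breakdown_py; infer_instance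

-- ===== CLAIM (what is proved, stated in full; the proofs are below) =====
def Claim_equal_bench_breakdown_py : Prop := ∀ (rows : List (List (String × String))), Dom_bench_breakdown_py rows → Spec_bench_breakdown_py rows (bench_breakdown_py rows)

-- ===== LEMMAS AND PROOFS =====

-- helper: the five-counter bucket as a literal dict
def pvMkB (t c j a n : Int) : PySem.Dict String Int :=
  PySem.Dict.mk [("total", t), ("complete", c), ("judged", j), ("acceptable", a), ("needs_revision", n)]

theorem pvUpdRow_mk (t c j a n : Int) (row : List (String × String)) :
    pvUpdRow (pvMkB t c j a n) row =
      pvMkB (t + 1)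
        (c + (if pvBCompl row then 1 else 0))
        (j + (if pvBVerdict row = some "acceptable" then 1 else 0)
           + (if pvBVerdict row = some "needs revision" then 1 else 0))
        (a + (if pvBVerdict row = some "acceptable" then 1 else 0))
        (n + (if pvBVerdict row = some "needs revision" then 1 else 0)) := by
  have hcompl : pvTruthy (pvRowGet row "hierarchy_completeness") = pvBCompl row := rfl
  have hv : pvRowGet row "judge_verdict" = pvBVerdict row := rfl
  unfold pvUpdRow
  rw [hcompl, hv]
  by_cases h1 : pvBVerdict row = some "acceptable"
  · have h2 : ¬ pvBVerdict row = some "needs revision" := by simp [h1]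
    by_cases hc : pvBCompl row <;>
      simp [pvMkB, h1, h2, hc, PySem.Dict.modify, PySem.Dict.contains, PySem.Dict.get?, PySem.Dict.getD, PySem.Dict.insert, List.find?]
  · by_cases h2 : pvBVerdict row = some "needs revision" <;>
    by_cases hc : pvBCompl row <;>
      simp [pvMkB, h1, h2, hc, PySem.Dict.modify, PySem.Dict.contains, PySem.Dict.get?, PySem.Dict.getD, PySem.Dict.insert, List.find?]

theorem pvFoldBucket (grp : List (List (String × String))) : ∀ (t c j a n : Int),
    grp.foldl pvUpdRow (pvMkB t c j a n) =
      pvMkB (t + grp.length)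
        (c + (grp.countP pvBCompl : Int))
        (j + (grp.countP (fun r => pvBVerdict r = some "acceptable") : Int)
           + (grp.countP (fun r => pvBVerdict r = some "needs revision") : Int))
        (a + (grp.countP (fun r => pvBVerdict r = some "acceptable") : Int))
        (n + (grp.countP (fun r => pvBVerdict r = some "needs revision") : Int)) := by
  induction grp with
  | nil => intro t c j a n; simp
  | cons row rest ih =>
    intro t c j a n
    rw [List.foldl_cons, pvUpdRow_mk, ih]
    unfold pvMkB
    simp only [PySem.Dict.mk.injEq, List.cons.injEq, Prod.mk.injEq, and_true, true_and]
    refine ⟨?_, ?_, ?_, ?_, ?_⟩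
    · simp; push_cast; ring
    · by_cases hp : pvBCompl row <;> simp [List.countP_cons, hp] <;> push_cast <;> ring
    · by_cases h1 : pvBVerdict row = some "acceptable" <;>
        by_cases h2 : pvBVerdict row = some "needs revision" <;>
        simp [List.countP_cons, h1, h2] <;> push_cast <;> ring
    · by_cases h1 : pvBVerdict row = some "acceptable" <;>
        simp [List.countP_cons, h1] <;> push_cast <;> ring
    · by_cases h2 : pvBVerdict row = some "needs revision" <;>
        simp [List.countP_cons, h2] <;> push_cast <;> ring

-- one step of A's loop, seen through keys / getD
theorem pvStepA_keys (d : PySem.Dict String (PySem.Dict String Int)) (row : List (String × String)) :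
    (pvStepA d row).keys = PySem.Set.add d.keys (pvBBench row) := by
  unfold pvStepA
  dsimp only
  have hb : (pvRowGet row "benchmark").getD "" = pvBBench row := rfl
  rw [hb]
  by_cases h : d.contains (pvBBench row) = true
  · rw [PySem.Dict.setdefault_of_contains _ _ h,
      PySem.Dict.keys_insert_of_contains _ _ h]
    simp [PySem.Set.add, ← PySem.Dict.contains_iff_mem_keys, h]
  · have h' : d.contains (pvBBench row) = false := by simpa using h
    rw [PySem.Dict.setdefault_of_not_contains _ _ h',
      PySem.Dict.keys_insert_of_contains _ _ (PySem.Dict.contains_insert_self _ _ _),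
      PySem.Dict.keys_insert_of_not_contains _ _ h']
    simp [PySem.Set.add, ← PySem.Dict.contains_iff_mem_keys, h']

theorem pvStepA_getD (d : PySem.Dict String (PySem.Dict String Int)) (row : List (String × String)) (k : String) :
    (pvStepA d row).getD k pvDefaultBucket =
      if k = pvBBench row then pvUpdRow (d.getD (pvBBench row) pvDefaultBucket) row
      else d.getD k pvDefaultBucket := by
  unfold pvStepA
  dsimp only
  have hb : (pvRowGet row "benchmark").getD "" = pvBBench row := rfl
  rw [hb]
  by_cases hk : k = pvBBench row
  · subst hk
    rw [PySem.Dict.getD_insert_self, PySem.Dict.getD_setdefault_self]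
    simp
  · rw [PySem.Dict.getD_insert_of_ne _ _ _ hk]
    rw [PySem.Dict.getD_eq_get?_getD, PySem.Dict.get?_setdefault_of_ne _ _ hk,
      ← PySem.Dict.getD_eq_get?_getD]
    simp [hk]

theorem pvFoldA_keys (rows : List (List (String × String))) :
    ∀ (d : PySem.Dict String (PySem.Dict String Int)),
    (rows.foldl pvStepA d).keys = PySem.Set.update d.keys (rows.map pvBBench) := by
  induction rows with
  | nil => intro d; simp [PySem.Set.update]
  | cons row rest ih =>
    intro d
    rw [List.foldl_cons, ih, pvStepA_keys, List.map_cons, PySem.Set.update_cons]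

theorem pvFoldA_getD (rows : List (List (String × String))) :
    ∀ (d : PySem.Dict String (PySem.Dict String Int)) (k : String),
    (rows.foldl pvStepA d).getD k pvDefaultBucket =
      (rows.filter (fun r => pvBBench r == k)).foldl pvUpdRow (d.getD k pvDefaultBucket) := by
  induction rows with
  | nil => intro d k; simp
  | cons row rest ih =>
    intro d k
    rw [List.foldl_cons, ih, pvStepA_getD]
    by_cases hk : pvBBench row == k
    · have hk' : k = pvBBench row := (beq_iff_eq.mp hk).symm
      simp [List.filter_cons, hk, hk']
    · have hk' : ¬ k = pvBBench row := fun h => by simp [h] at hk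
      simp [List.filter_cons, hk, hk']

theorem pvFoldB_keys (rows : List (List (String × String))) :
    (rows.foldl (fun g row => g.modify (pvBBench row) [] (· ++ [row])) PySem.Dict.empty).keys
      = PySem.Set.update (PySem.Dict.empty : PySem.Dict String (List (List (String × String)))).keys (rows.map pvBBench) :=
  PySem.Dict.keys_foldl_modify_key rows pvBBench [] _ PySem.Dict.empty

theorem pvFoldB_getD (rows : List (List (String × String))) :
    ∀ (g : PySem.Dict String (List (List (String × String)))) (k : String),
    (rows.foldl (fun g row => g.modify (pvBBench row) [] (· ++ [row])) g).getD k []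
      = g.getD k [] ++ rows.filter (fun r => pvBBench r == k) := by
  induction rows with
  | nil => intro g k; simp
  | cons row rest ih =>
    intro g k
    rw [List.foldl_cons, ih, PySem.Dict.getD_modify]
    by_cases hk : pvBBench row == k
    · have hk' : k = pvBBench row := (beq_iff_eq.mp hk).symm
      simp [List.filter_cons, hk, hk']
    · have hk' : ¬ k = pvBBench row := fun h => by simp [h] at hk
      simp [List.filter_cons, hk, hk']

theorem pvBucket_items (grp : List (List (String × String))) :
    (grp.foldl pvUpdRow pvDefaultBucket).items = pvBBucket grp := by
  have h0 : pvDefaultBucket = pvMkB 0 0 0 0 0 := rfl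
  rw [h0, pvFoldBucket]
  simp [pvMkB, pvBBucket]

-- ===== VERDICT (by name: the statement is the Claim_ definition above) =====
theorem bench_breakdown_py_spec : Claim_equal_bench_breakdown_py := by
  intro rows _
  unfold Spec_bench_breakdown_py bench_breakdown_py bench_breakdown_py_alt
  dsimp only
  have hkA := pvFoldA_keys rows PySem.Dict.empty
  have hkB := pvFoldB_keys rows
  rw [PySem.Dict.keys_empty] at hkA hkB
  have hndA : (rows.foldl pvStepA PySem.Dict.empty).keys.Nodup := by
    rw [hkA]; exact PySem.Set.nodup_update _ _ (by simp)
  have hndB : ((rows.foldl (fun g row => g.modify (pvBBench row) [] (· ++ [row]))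
      PySem.Dict.empty).keys).Nodup := by
    rw [hkB]; exact PySem.Set.nodup_update _ _ (by simp)
  rw [PySem.Dict.items_eq_map_keys _ hndA pvDefaultBucket,
      PySem.Dict.items_eq_map_keys _ hndB [], hkA, hkB, List.map_map, List.map_map]
  apply List.map_congr_left
  intro k _
  simp only [Function.comp]
  rw [pvFoldA_getD, pvFoldB_getD, PySem.Dict.getD_empty, PySem.Dict.getD_empty,
    List.nil_append, pvBucket_items]
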